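-- pv_equiv track=rewrite | github.com/moneshvenkul/Arista_Sub | update_configs.py | categorize_configs
-- ===== SOURCE A (Python) =====
-- def categorize_configs(configs):
--     categories = {
--         'vmess': [],
--         'vless': [],
--         'trojan': [],
--         'ss': [],
--         'hysteria2': [],
--         'hysteria': [],
--         'tuic': [],
--         'wireguard': [],
--         'other': []
--     }
--
--     for config in configs:
--         if isinstance(config, str):
--             if config.startswith('vmess://'):
--                 categories['vmess'].append(config)
--             elif config.startswith('vless://'):
--                 categories['vless'].append(config)
--             elif config.startswith('trojan://'):
--                 categories['trojan'].append(config)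
--             elif config.startswith('ss://'):
--                 categories['ss'].append(config)
--             elif config.startswith('hysteria2://') or config.startswith('hy2://'):
--                 categories['hysteria2'].append(config)
--             elif config.startswith('hysteria://'):
--                 categories['hysteria'].append(config)
--             elif config.startswith('tuic://'):
--                 categories['tuic'].append(config)
--             elif config.startswith('wg'):
--                 categories['wireguard'].append(config)
--             else:
--                 categories['other'].append(config)
--     return categories
-- ===== SOURCE B (Python) =====
-- PREFIX_TABLE = [
--     ('vmess', ('vmess://',)),
--     ('vless', ('vless://',)),
--     ('trojan', ('trojan://',)),
--     ('ss', ('ss://',)),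
--     ('hysteria2', ('hysteria2://', 'hy2://')),
--     ('hysteria', ('hysteria://',)),
--     ('tuic', ('tuic://',)),
--     ('wireguard', ('wg',)),
-- ]
--
-- def _label(config):
--     for name, prefixes in PREFIX_TABLE:
--         if config.startswith(prefixes):
--             return name
--     return 'other'
--
-- def categorize_configs(configs):
--     strs = [c for c in configs if isinstance(c, str)]
--     return {name: [c for c in strs if _label(c) == name]
--             for name, _ in PREFIX_TABLE + [('other', ())]}
-- ===== Notes on version B (the rewrite author's own statement) =====
-- stated objective: simpler
-- what changed: Replaces A's hard-coded nine-branch elif chain over a mutable dict with a data-driven (category, prefixes) table: a label helper returns the first matching category and the result dict is built by one filter pass per category.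
import Mathlib
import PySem

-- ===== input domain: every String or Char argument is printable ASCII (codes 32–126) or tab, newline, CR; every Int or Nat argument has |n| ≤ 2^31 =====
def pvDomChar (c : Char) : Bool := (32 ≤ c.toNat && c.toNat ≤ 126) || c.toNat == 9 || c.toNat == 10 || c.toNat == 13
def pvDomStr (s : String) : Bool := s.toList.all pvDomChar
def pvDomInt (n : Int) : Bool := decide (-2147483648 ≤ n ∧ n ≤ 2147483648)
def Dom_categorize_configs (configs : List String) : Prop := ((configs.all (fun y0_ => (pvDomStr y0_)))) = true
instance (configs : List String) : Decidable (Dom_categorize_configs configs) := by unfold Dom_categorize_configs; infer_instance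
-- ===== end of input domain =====

-- B replaces A's fixed elif chain by a prefix table: a label helper scans the table
-- for the first matching prefix and the result is one filter pass per category (objective: simpler).
-- In Lean's typed setting configs : List String, so A's isinstance guard is always true and is omitted.

-- ===== PORT A =====
-- the literal dict of empty category lists A starts from
def pvInitCats : PySem.Dict String (List String) :=
  ((((((((PySem.Dict.empty.insert "vmess" []).insert "vless" []).insert "trojan" []).insert
      "ss" []).insert "hysteria2" []).insert "hysteria" []).insert "tuic" []).insert
      "wireguard" []).insert "other" []

def categorize_configs (configs : List String) : List (String × List String) :=
  (configs.foldl (fun d config =>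
    if PySem.Str.startswith config "vmess://" then d.modify "vmess" [] (· ++ [config])
    else if PySem.Str.startswith config "vless://" then d.modify "vless" [] (· ++ [config])
    else if PySem.Str.startswith config "trojan://" then d.modify "trojan" [] (· ++ [config])
    else if PySem.Str.startswith config "ss://" then d.modify "ss" [] (· ++ [config])
    else if PySem.Str.startswith config "hysteria2://" || PySem.Str.startswith config "hy2://" then
      d.modify "hysteria2" [] (· ++ [config])
    else if PySem.Str.startswith config "hysteria://" then d.modify "hysteria" [] (· ++ [config])
    else if PySem.Str.startswith config "tuic://" then d.modify "tuic" [] (· ++ [config])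
    else if PySem.Str.startswith config "wg" then d.modify "wireguard" [] (· ++ [config])
    else d.modify "other" [] (· ++ [config])) pvInitCats).items

-- ===== PORT B =====
def pvTable : List (String × List String) :=
  [("vmess", ["vmess://"]), ("vless", ["vless://"]), ("trojan", ["trojan://"]), ("ss", ["ss://"]),
   ("hysteria2", ["hysteria2://", "hy2://"]), ("hysteria", ["hysteria://"]), ("tuic", ["tuic://"]),
   ("wireguard", ["wg"])]

def pvLabel (config : String) : String :=
  match pvTable.find? (fun e => e.2.any (fun p => PySem.Str.startswith config p)) with
  | some e => e.1
  | none => "other"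

def categorize_configs_alt (configs : List String) : List (String × List String) :=
  (pvTable.map (·.1) ++ ["other"]).map
    (fun name => (name, configs.filter (fun c => pvLabel c == name)))

-- ===== PRECONDITION & SPEC =====
def Spec_categorize_configs (configs : List String) (out : List (String × List String)) : Prop := out = categorize_configs_alt configs
instance (configs : List String) (out : List (String × List String)) : Decidable (Spec_categorize_configs configs out) := by unfold Spec_categorize_configs; infer_instance

-- ===== CLAIM (what is proved, stated in full; the proofs are below) =====
def Claim_equal_categorize_configs : Prop := ∀ (configs : List String), Dom_categorize_configs configs → Spec_categorize_configs configs (categorize_configs configs)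

-- ===== LEMMAS AND PROOFS =====

-- A's branch chain is exactly 'append config to the pvLabel-chosen category'
theorem pv_step_eq (d : PySem.Dict String (List String)) (c : String) :
    (if PySem.Str.startswith c "vmess://" then d.modify "vmess" [] (· ++ [c])
    else if PySem.Str.startswith c "vless://" then d.modify "vless" [] (· ++ [c])
    else if PySem.Str.startswith c "trojan://" then d.modify "trojan" [] (· ++ [c])
    else if PySem.Str.startswith c "ss://" then d.modify "ss" [] (· ++ [c])
    else if PySem.Str.startswith c "hysteria2://" || PySem.Str.startswith c "hy2://" then
      d.modify "hysteria2" [] (· ++ [c])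
    else if PySem.Str.startswith c "hysteria://" then d.modify "hysteria" [] (· ++ [c])
    else if PySem.Str.startswith c "tuic://" then d.modify "tuic" [] (· ++ [c])
    else if PySem.Str.startswith c "wg" then d.modify "wireguard" [] (· ++ [c])
    else d.modify "other" [] (· ++ [c])) = d.modify (pvLabel c) [] (· ++ [c]) := by
  simp only [pvLabel, pvTable, List.find?, List.any, Bool.or_false]
  by_cases h2a : PySem.Str.startswith c "hysteria2://" <;>
    by_cases h2b : PySem.Str.startswith c "hy2://" <;>
    split_ifs <;> simp_all

theorem pvLabel_mem (c : String) : pvLabel c ∈ (pvTable.map (·.1) ++ ["other"]) := by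
  unfold pvLabel
  cases hf : pvTable.find? (fun e => e.2.any (fun p => PySem.Str.startswith c p)) with
  | none => simp
  | some e =>
      have he := List.mem_of_find?_eq_some hf
      simp only [List.mem_append]
      exact Or.inl (List.mem_map.mpr ⟨e, he, rfl⟩)

theorem pvInit_getD (k : String) : pvInitCats.getD k [] = [] := by
  simp only [pvInitCats, PySem.Dict.getD_insert, PySem.Dict.getD_empty]
  split_ifs <;> rfl

theorem pv_update_of_subset (s : PySem.Set String) (l : List String)
    (h : ∀ x ∈ l, x ∈ s) : PySem.Set.update s l = s := by
  induction l generalizing s with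
  | nil => rfl
  | cons x xs ih =>
      rw [PySem.Set.update_cons, PySem.Set.add_of_mem (h x (by simp))]
      exact ih s (fun y hy => h y (by simp [hy]))

-- ===== VERDICT (by name: the statement is the Claim_ definition above) =====
theorem categorize_configs_spec : Claim_equal_categorize_configs := by
  intro configs _
  unfold Spec_categorize_configs categorize_configs categorize_configs_alt
  simp only [pv_step_eq]
  have hfold : ∀ (l : List String) (d : PySem.Dict String (List String)),
      l.foldl (fun d c => d.modify (pvLabel c) [] (· ++ [c])) d
      = (l.map (fun c => (pvLabel c, c))).foldl
          (fun d p => d.modify p.1 [] (· ++ [p.2])) d := by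
    intro l
    induction l with
    | nil => intro d; rfl
    | cons x xs ih => intro d; simp only [List.map_cons, List.foldl_cons, ih]
  rw [hfold]
  have hkeys : ((configs.map (fun c => (pvLabel c, c))).foldl
      (fun d p => d.modify p.1 [] (· ++ [p.2])) pvInitCats).keys
      = pvTable.map (·.1) ++ ["other"] := by
    rw [PySem.Dict.keys_foldl_modify_key]
    simp only [List.map_map]
    have h0 : pvInitCats.keys = pvTable.map (·.1) ++ ["other"] := by decide
    rw [h0]
    exact pv_update_of_subset _ _ (by
      intro x hx
      simp only [List.mem_map, Function.comp] at hx
      obtain ⟨c, _, rfl⟩ := hx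
      exact pvLabel_mem c)
  have hnd : ((configs.map (fun c => (pvLabel c, c))).foldl
      (fun d p => d.modify p.1 [] (· ++ [p.2])) pvInitCats).keys.Nodup := by
    rw [hkeys]; decide
  rw [PySem.Dict.items_eq_map_keys _ hnd [], hkeys]
  refine List.map_congr_left ?_
  intro k hk
  rw [PySem.Dict.getD_foldl_modify_append]
  simp [pvInit_getD, List.filter_map, List.map_map, Function.comp_def]
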